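-- pv_equiv track=rewrite | github.com/DynamicEV21/CrabQuant | scripts/measure_convergence.py | extract_archetype
-- ===== SOURCE A (Python) =====
-- KNOWN_ARCHETYPES = [
--     "momentum",
--     "mean_reversion",
--     "breakout",
--     "trend",
--     "volume",
--     "volatility",
-- ]
--
-- def extract_archetype(mandate_name: str) -> str | None:
--     """Extract archetype from mandate name (e.g. 'momentum_aapl' -> 'momentum')."""
--     name_lower = mandate_name.lower().replace(" ", "_")
--     for arch in KNOWN_ARCHETYPES:
--         if name_lower.startswith(arch + "_") or name_lower.startswith(arch + " "):
--             return arch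
--         # Also check if archetype appears as a standalone word
--         parts = name_lower.split("_")
--         if parts and parts[0] == arch:
--             return arch
--     return None
-- ===== SOURCE B (Python) =====
-- KNOWN_ARCHETYPES = [
--     "momentum",
--     "mean_reversion",
--     "breakout",
--     "trend",
--     "volume",
--     "volatility",
-- ]
--
-- # Archetypes split by whether their name itself contains an underscore:
-- # a single-token archetype matches iff it is exactly the first '_'-token of the
-- # normalized name; a multi-token one only ever matches as a proper prefix.
-- _SINGLE = [a for a in KNOWN_ARCHETYPES if "_" not in a]
-- _MULTI = [a for a in KNOWN_ARCHETYPES if "_" in a]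
--
--
-- def extract_archetype(mandate_name: str) -> str | None:
--     """Extract archetype from mandate name (e.g. 'momentum_aapl' -> 'momentum')."""
--     parts = mandate_name.lower().replace(" ", "_").split("_")
--     first = parts[0]
--     if first in _SINGLE:
--         return first
--     head2 = "_".join(parts[:2])
--     if len(parts) >= 3 and head2 in _MULTI:
--         return head2
--     return None
-- ===== Notes on version B (the rewrite author's own statement) =====
-- stated objective: simpler
-- what changed: Instead of looping over every known archetype and testing string prefixes (re-splitting the name on each iteration), B tokenizes the normalized name once on underscores and does direct membership lookups of the first token (and, for the one underscore-containing archetype, of the first two tokens rejoined) in precomputed single-/multi-token archetype lists.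
import Mathlib
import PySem

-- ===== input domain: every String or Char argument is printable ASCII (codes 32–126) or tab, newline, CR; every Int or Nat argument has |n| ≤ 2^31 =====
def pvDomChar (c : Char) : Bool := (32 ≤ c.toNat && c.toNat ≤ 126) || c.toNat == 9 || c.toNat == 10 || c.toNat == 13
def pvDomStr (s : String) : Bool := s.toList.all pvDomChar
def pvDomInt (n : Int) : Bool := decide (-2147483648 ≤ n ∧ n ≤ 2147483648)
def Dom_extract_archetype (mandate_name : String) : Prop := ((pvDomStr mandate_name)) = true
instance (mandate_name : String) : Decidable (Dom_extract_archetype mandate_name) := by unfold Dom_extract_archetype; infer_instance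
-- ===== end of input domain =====

-- B replaces A's per-archetype prefix-testing loop (which re-splits the name on every
-- iteration) by tokenizing the normalized name once and looking the candidate token(s)
-- up in precomputed single-/multi-token archetype lists (objective: simpler).


-- ===== PORT A =====
-- module-level constant shared by both Pythons
def KNOWN_ARCHETYPES : List String :=
  ["momentum", "mean_reversion", "breakout", "trend", "volume", "volatility"]

-- A's 'for arch in KNOWN_ARCHETYPES' loop; Python's name_lower.split("_") never raises
-- (the separator is the nonempty literal "_"), so split?'s .getD [] default is never taken,
-- and parts[0] is read under the guard 'parts and …', so headD's default is never taken.
def extractGo (name_lower : String) : List String → Option String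
  | [] => none
  | arch :: rest =>
    if PySem.Str.startswith name_lower (arch ++ "_") || PySem.Str.startswith name_lower (arch ++ " ") then
      some arch
    else
      let parts := (PySem.Str.split? name_lower "_").getD []
      if !parts.isEmpty && parts.headD "" == arch then some arch
      else extractGo name_lower rest

def extract_archetype (mandate_name : String) : Option String :=
  let name_lower := PySem.Str.replace (PySem.Str.lower mandate_name) " " "_"
  extractGo name_lower KNOWN_ARCHETYPES

-- ===== PORT B =====
def SINGLE_ARCHETYPES : List String := KNOWN_ARCHETYPES.filter (fun a => !(PySem.Str.isIn "_" a))
def MULTI_ARCHETYPES : List String := KNOWN_ARCHETYPES.filter (fun a => PySem.Str.isIn "_" a)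

-- split("_") never raises and never returns an empty list: .getD [] / headD "" defaults unused
def extract_archetype_alt (mandate_name : String) : Option String :=
  let parts := (PySem.Str.split? (PySem.Str.replace (PySem.Str.lower mandate_name) " " "_") "_").getD []
  let first := parts.headD ""
  if SINGLE_ARCHETYPES.contains first then some first
  else
    let head2 := PySem.Str.join "_" (parts.take 2)
    if decide (3 ≤ parts.length) && MULTI_ARCHETYPES.contains head2 then some head2
    else none

-- ===== PRECONDITION & SPEC =====
def Spec_extract_archetype (mandate_name : String) (out : Option String) : Prop := out = extract_archetype_alt mandate_name
instance (mandate_name : String) (out : Option String) : Decidable (Spec_extract_archetype mandate_name out) := by unfold Spec_extract_archetype; infer_instance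

-- ===== CLAIM (what is proved, stated in full; the proofs are below) =====
def Claim_equal_extract_archetype : Prop := ∀ (mandate_name : String), Dom_extract_archetype mandate_name → Spec_extract_archetype mandate_name (extract_archetype mandate_name)

-- ===== LEMMAS AND PROOFS =====

-- abbreviation used only in the proofs: Python's split("_") on the char level
def sp (l : List Char) : List (List Char) := List.splitOnP (fun c => c == '_') l

theorem sp_ne_nil (l : List Char) : sp l ≠ [] := List.splitOnP_ne_nil _ l

theorem replaceGo_no_space (fuel : Nat) (l acc : List Char)
    (hl : l.length ≤ fuel) (ha : ' ' ∉ acc) :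
    ' ' ∉ PySem.Chars.replace.go [' '] ['_'] fuel l acc := by
  induction fuel generalizing l acc with
  | zero =>
    have : l = [] := List.eq_nil_of_length_eq_zero (Nat.le_zero.mp hl)
    subst this
    simpa [PySem.Chars.replace.go] using ha
  | succ fuel ih =>
    cases l with
    | nil => simpa [PySem.Chars.replace.go] using ha
    | cons c t =>
      by_cases hc : c = ' '
      · subst hc
        simp only [PySem.Chars.replace.go, List.isPrefixOf, BEq.rfl, Bool.true_and, if_pos,
          List.reverse_singleton, List.singleton_append]
        exact ih t ('_' :: acc) (by simpa using hl) (by simp [ha])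
      · have hpre : [' '].isPrefixOf (c :: t) = false := by
          simp [List.isPrefixOf]; exact fun h => (hc h.symm).elim
        simp only [PySem.Chars.replace.go, hpre, Bool.false_eq_true, if_false]
        exact ih t (c :: acc) (by simpa using hl)
          (by simp [ha]; exact fun h => hc h.symm)

theorem no_space_replace (s : List Char) : ' ' ∉ PySem.Chars.replace s [' '] ['_'] := by
  simp only [PySem.Chars.replace, List.isEmpty_cons, Bool.false_eq_true, if_false]
  exact replaceGo_no_space s.length s [] le_rfl (by simp)

theorem splitGo_eq (fuel : Nat) (l cur : List Char) (acc : List (List Char))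
    (hl : l.length ≤ fuel) :
    PySem.Chars.splitOn.go ['_'] fuel l cur acc
      = acc.reverse ++ (sp l).modifyHead (cur.reverse ++ ·) := by
  induction fuel generalizing l cur acc with
  | zero =>
    have : l = [] := List.eq_nil_of_length_eq_zero (Nat.le_zero.mp hl)
    subst this
    simp [PySem.Chars.splitOn.go, sp, List.splitOnP_nil]
  | succ fuel ih =>
    cases l with
    | nil => simp [PySem.Chars.splitOn.go, sp, List.splitOnP_nil]
    | cons c t =>
      by_cases hc : c = '_'
      · subst hc
        have hpre : ['_'].isPrefixOf ('_' :: t) = true := by simp [List.isPrefixOf]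
        simp only [PySem.Chars.splitOn.go, hpre, if_pos, List.length_singleton,
          List.drop_succ_cons, List.drop_zero]
        rw [ih t [] (cur.reverse :: acc) (by simpa using hl)]
        obtain ⟨h0, tl, hsp⟩ : ∃ h0 tl, sp t = h0 :: tl := by
          rcases h : sp t with _ | ⟨h0, tl⟩
          · exact absurd h (sp_ne_nil t)
          · exact ⟨h0, tl, rfl⟩
        have hsp' : List.splitOnP (fun c => c == '_') t = h0 :: tl := hsp
        simp [sp, List.splitOnP_cons, hsp']
      · have hpre : ['_'].isPrefixOf (c :: t) = false := by
          simp [List.isPrefixOf]; exact fun h => (hc h.symm).elim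
        simp only [PySem.Chars.splitOn.go, hpre, Bool.false_eq_true, if_false]
        rw [ih t (c :: cur) acc (by simpa using hl)]
        obtain ⟨h0, tl, hsp⟩ : ∃ h0 tl, sp t = h0 :: tl := by
          rcases h : sp t with _ | ⟨h0, tl⟩
          · exact absurd h (sp_ne_nil t)
          · exact ⟨h0, tl, rfl⟩
        have hsp' : List.splitOnP (fun c => c == '_') t = h0 :: tl := hsp
        simp [sp, List.splitOnP_cons, hc, hsp']

theorem splitOn_eq_sp (l : List Char) : PySem.Chars.splitOn l ['_'] = sp l := by
  rw [PySem.Chars.splitOn, splitGo_eq l.length.succ l [] [] (Nat.le_succ _)]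
  obtain ⟨h0, tl, hsp⟩ : ∃ h0 tl, sp l = h0 :: tl := by
    rcases h : sp l with _ | ⟨h0, tl⟩
    · exact absurd h (sp_ne_nil l)
    · exact ⟨h0, tl, rfl⟩
  simp [hsp]

theorem not_underscore_mem_sp (l : List Char) : ∀ p ∈ sp l, '_' ∉ p := by
  induction l with
  | nil => simp [sp, List.splitOnP_nil]
  | cons c t ih =>
    obtain ⟨h0, tl, hsp⟩ : ∃ h0 tl, sp t = h0 :: tl := by
      rcases h : sp t with _ | ⟨h0, tl⟩
      · exact absurd h (sp_ne_nil t)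
      · exact ⟨h0, tl, rfl⟩
    have hsp' : List.splitOnP (fun c => c == '_') t = h0 :: tl := hsp
    by_cases hc : c = '_'
    · subst hc
      simp only [sp, List.splitOnP_cons, BEq.rfl, if_pos, List.mem_cons]
      rintro p (rfl | hp)
      · simp
      · exact ih p hp
    · simp only [sp, List.splitOnP_cons, beq_iff_eq, hc, if_false, hsp',
        List.modifyHead_cons, List.mem_cons]
      rintro p (rfl | hp)
      · intro hmem
        rcases List.mem_cons.mp hmem with h | h
        · exact hc h.symm
        · exact ih h0 (by rw [hsp]; exact List.mem_cons_self) h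
      · exact ih p (by rw [hsp]; exact List.mem_cons_of_mem _ hp)

theorem sp_append_underscore (a v : List Char) (ha : '_' ∉ a) :
    sp (a ++ '_' :: v) = a :: sp v := by
  induction a with
  | nil => simp [sp, List.splitOnP_cons]
  | cons c a' ih =>
    have hc : c ≠ '_' := fun h => ha (by simp [h])
    have ha' : '_' ∉ a' := fun h => ha (by simp [h])
    simp only [List.cons_append, sp, List.splitOnP_cons, beq_iff_eq, hc, if_false]
    rw [show List.splitOnP (fun c => c == '_') (a' ++ '_' :: v) = a' :: sp v from ih ha']
    rfl

theorem startswith_space_false (L p : List Char) (hs : ' ' ∉ L) (hp : ' ' ∈ p) :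
    PySem.Chars.startswith L p = false := by
  rw [Bool.eq_false_iff]
  intro h
  exact hs (((PySem.Chars.startswith_iff L p).mp h).sublist.subset hp)

theorem sw_head (L a : List Char) (ha : '_' ∉ a)
    (h : PySem.Chars.startswith L (a ++ ['_']) = true) : (sp L).headD [] = a := by
  obtain ⟨v, hv⟩ := (PySem.Chars.startswith_iff L (a ++ ['_'])).mp h
  have : L = a ++ '_' :: v := by simpa using hv.symm
  subst this
  rw [sp_append_underscore a v ha]
  rfl

theorem sw_trans (L p q : List Char) (hpq : p <+: q)
    (h : PySem.Chars.startswith L q = true) : PySem.Chars.startswith L p = true :=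
  (PySem.Chars.startswith_iff L p).mpr (hpq.trans ((PySem.Chars.startswith_iff L q).mp h))

-- the one multi-token archetype: 'mean_reversion_' is a prefix of the name
-- exactly when the name splits into ≥ 3 tokens whose first two rejoin to 'mean_reversion'
-- the one multi-token archetype: 'mean_reversion_' is a prefix of the name
-- exactly when the name splits into ≥ 3 tokens whose first two rejoin to 'mean_reversion'
theorem intercalate_cons_cons' (x : Char) (a b : List Char) (l : List (List Char)) :
    [x].intercalate (a :: b :: l) = a ++ x :: [x].intercalate (b :: l) := by
  simp [List.intercalate]

theorem multi_iff (L : List Char) :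
    PySem.Chars.startswith L ("mean_reversion_".toList) =
      (decide (3 ≤ (sp L).length) &&
        (PySem.Chars.join ['_'] ((sp L).take 2) == "mean_reversion".toList)) := by
  rw [Bool.eq_iff_iff]
  simp only [Bool.and_eq_true, decide_eq_true_eq, beq_iff_eq]
  constructor
  · intro h
    obtain ⟨v, hv⟩ := (PySem.Chars.startswith_iff L ("mean_reversion_".toList)).mp h
    have hL : L = "mean".toList ++ '_' :: ("reversion".toList ++ '_' :: v) := by
      rw [← hv]; rfl
    subst hL
    rw [sp_append_underscore _ _ (by decide),
        sp_append_underscore _ _ (by decide)]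
    obtain ⟨h0, tl, hsp⟩ : ∃ h0 tl, sp v = h0 :: tl := by
      rcases hx : sp v with _ | ⟨h0, tl⟩
      · exact absurd hx (sp_ne_nil v)
      · exact ⟨h0, tl, rfl⟩
    constructor
    · simp [hsp]
    · have htake : ("mean".toList :: "reversion".toList :: sp v).take 2
          = ["mean".toList, "reversion".toList] := rfl
      rw [htake, PySem.Chars.join_cons_cons, PySem.Chars.join_singleton]
      decide
  · rintro ⟨hlen, hjoin⟩
    obtain ⟨p, q, r, tl, hsp⟩ : ∃ p q r tl, sp L = p :: q :: r :: tl := by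
      rcases hx : sp L with _ | ⟨p, _ | ⟨q, _ | ⟨r, tl⟩⟩⟩
      · exact absurd hx (sp_ne_nil L)
      · rw [hx] at hlen; simp at hlen
      · rw [hx] at hlen; simp at hlen
      · exact ⟨p, q, r, tl, rfl⟩
    have htake : (p :: q :: r :: tl).take 2 = [p, q] := rfl
    rw [hsp, htake, PySem.Chars.join_cons_cons, PySem.Chars.join_singleton] at hjoin
    have hL : L = ['_'].intercalate (sp L) := by
      have := List.intercalate_splitOn (xs := L) '_'
      rw [show List.splitOn '_' L = sp L from rfl] at this
      exact this.symm
    rw [hsp, intercalate_cons_cons', intercalate_cons_cons'] at hL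
    apply (PySem.Chars.startswith_iff _ _).mpr
    refine ⟨['_'].intercalate (r :: tl), ?_⟩
    rw [hL]
    have hm : ("mean_reversion_".toList : List Char) = (p ++ ['_'] ++ q) ++ ['_'] := by
      rw [hjoin]; decide
    rw [hm]
    simp

-- String-level BEq is toList-level BEq
theorem str_beq_toList (x y : String) : (x == y) = (x.toList == y.toList) := by
  rw [Bool.eq_iff_iff]
  simp [String.toList_inj]

-- ===== main proof =====

theorem extract_archetype_spec : Claim_equal_extract_archetype := by
  intro s _
  unfold Spec_extract_archetype extract_archetype extract_archetype_alt
  set nl := PySem.Str.replace (PySem.Str.lower s) " " "_" with hnl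
  have hsp0 : ' ' ∉ nl.toList := by
    rw [hnl, PySem.Str.toList_replace]
    exact no_space_replace _
  -- the split result, bridged to the char level
  obtain ⟨ps, hps, hmap⟩ : ∃ ps, PySem.Str.split? nl "_" = some ps ∧
      ps.map String.toList = sp nl.toList := by
    have h := PySem.Str.split?_map nl "_"
    rw [show ("_" : String).toList = ['_'] from rfl] at h
    rw [PySem.Chars.split?] at h
    simp only [List.isEmpty_cons, Bool.false_eq_true, if_false] at h
    rcases hx : PySem.Str.split? nl "_" with _ | ps
    · rw [hx] at h; simp at h
    · rw [hx] at h
      simp only [Option.map_some, Option.some.injEq] at h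
      exact ⟨ps, rfl, by rw [h, splitOn_eq_sp]⟩
  have hpsne : ps ≠ [] := by
    intro h
    exact sp_ne_nil nl.toList (by rw [← hmap, h]; rfl)
  obtain ⟨p0, pt, hcons⟩ : ∃ p0 pt, ps = p0 :: pt := by
    rcases ps with _ | ⟨p0, pt⟩
    · exact absurd rfl hpsne
    · exact ⟨p0, pt, rfl⟩
  -- first token, char level
  have hhead : (sp nl.toList).headD [] = p0.toList := by
    rw [← hmap, hcons]; rfl
  -- A's per-single-archetype condition collapses to 'first token equals it'
  have hspace : ∀ (w : String), ' ' ∈ w.toList → PySem.Str.startswith nl w = false := by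
    intro w hw
    rw [PySem.Str.startswith_eq]
    exact startswith_space_false _ _ hsp0 hw
  have hsingle : ∀ (a : String), '_' ∉ a.toList →
      PySem.Str.startswith nl (a ++ "_") = true → p0 = a := by
    intro a ha h
    rw [PySem.Str.startswith_eq, String.toList_append,
      show ("_" : String).toList = ['_'] from rfl] at h
    have := sw_head nl.toList a.toList ha h
    rw [hhead] at this
    exact String.toList_inj.mp this
  -- the multi-token condition, bridged to B's Boolean
  have hlen : ps.length = (sp nl.toList).length := by rw [← hmap, List.length_map]
  have hjoin : (PySem.Str.join "_" (ps.take 2)).toList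
      = PySem.Chars.join ['_'] ((sp nl.toList).take 2) := by
    rw [PySem.Str.toList_join, ← hmap, List.map_take]; rfl
  have hmulti : PySem.Str.startswith nl ("mean_reversion" ++ "_")
      = (decide (3 ≤ ps.length) && (PySem.Str.join "_" (ps.take 2) == "mean_reversion")) := by
    rw [PySem.Str.startswith_eq,
      show ("mean_reversion" ++ "_" : String).toList = "mean_reversion_".toList by decide,
      multi_iff, ← hlen, ← hjoin, ← str_beq_toList]
  have hmean : (decide (3 ≤ ps.length) && (PySem.Str.join "_" (ps.take 2) == "mean_reversion")) = true
      → p0 = "mean" := by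
    intro h
    rw [← hmulti] at h
    apply hsingle "mean" (by decide)
    rw [PySem.Str.startswith_eq] at h ⊢
    exact sw_trans _ _ _ (by decide) h
  have hswf : ∀ (a : String), '_' ∉ a.toList → p0 ≠ a →
      PySem.Str.startswith nl (a ++ "_") = false := by
    intro a ha hne
    cases hx : PySem.Str.startswith nl (a ++ "_") with
    | false => rfl
    | true => exact absurd (hsingle a ha hx) hne
  have hp0mem : p0.toList ∈ sp nl.toList := by
    rw [← hmap, hcons]; simp
  have hp0nu : '_' ∉ p0.toList := not_underscore_mem_sp _ _ hp0mem
  have hp0mr : p0 ≠ "mean_reversion" := by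
    intro h; rw [h] at hp0nu; exact hp0nu (by decide)
  have hS : SINGLE_ARCHETYPES = ["momentum", "breakout", "trend", "volume", "volatility"] := by decide
  have hM2 : MULTI_ARCHETYPES = ["mean_reversion"] := by decide
  have s1 := hspace ("momentum" ++ " ") (by decide)
  have s2 := hspace ("mean_reversion" ++ " ") (by decide)
  have s3 := hspace ("breakout" ++ " ") (by decide)
  have s4 := hspace ("trend" ++ " ") (by decide)
  have s5 := hspace ("volume" ++ " ") (by decide)
  have s6 := hspace ("volatility" ++ " ") (by decide)
  simp only [extractGo, KNOWN_ARCHETYPES, hps, Option.getD_some, hcons, hS, hM2,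
    s1, s2, s3, s4, s5, s6, Bool.or_false, List.isEmpty_cons, Bool.not_false,
    Bool.true_and, List.headD_cons]
  rw [← hcons]
  by_cases h1 : p0 = "momentum"
  · simp [h1]
  have hb1 : (p0 == "momentum") = false := beq_eq_false_iff_ne.mpr h1
  have hswm := hswf "momentum" (by decide) h1
  have hbmr : (p0 == "mean_reversion") = false := beq_eq_false_iff_ne.mpr hp0mr
  by_cases hMc : (decide (3 ≤ ps.length) && (PySem.Str.join "_" (ps.take 2) == "mean_reversion")) = true
  · have h := hMc
    simp only [Bool.and_eq_true, decide_eq_true_eq, beq_iff_eq] at h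
    obtain ⟨hlen3, hj⟩ := h
    have hp0mean : p0 = "mean" := hmean hMc
    rw [hmulti]
    simp at hswm
    simp [hswm, hj, hp0mean, hlen3]
  · have hswmr : PySem.Str.startswith nl ("mean_reversion" ++ "_") = false := by
      rw [hmulti]; exact Bool.eq_false_iff.mpr hMc
    have hMcf : (decide (3 ≤ ps.length) && (PySem.Str.join "_" (ps.take 2) == "mean_reversion")) = false :=
      Bool.eq_false_iff.mpr hMc
    simp at hswm hswmr hMcf
    by_cases h2 : p0 = "breakout"
    · simp [hswm, hswmr, h2]
    have hb2 : (p0 == "breakout") = false := beq_eq_false_iff_ne.mpr h2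
    have hswb := hswf "breakout" (by decide) h2
    simp at hswb
    by_cases h3 : p0 = "trend"
    · simp [hswm, hswmr, hswb, h3]
    have hb3 : (p0 == "trend") = false := beq_eq_false_iff_ne.mpr h3
    have hswt := hswf "trend" (by decide) h3
    simp at hswt
    by_cases h4 : p0 = "volume"
    · simp [hswm, hswmr, hswb, hswt, h4]
    have hb4 : (p0 == "volume") = false := beq_eq_false_iff_ne.mpr h4
    have hswv := hswf "volume" (by decide) h4
    simp at hswv
    by_cases h5 : p0 = "volatility"
    · simp [hswm, hswmr, hswb, hswt, hswv, h5]
    have hb5 : (p0 == "volatility") = false := beq_eq_false_iff_ne.mpr h5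
    have hswvo := hswf "volatility" (by decide) h5
    simp at hswvo
    simp [hswm, hb1, hswmr, hbmr, hswb, hb2, hswt, hb3, hswv, hb4, hswvo, hb5]
    rw [if_neg (by simp [h1, h2, h3, h4, h5]),
        if_neg (by rintro ⟨hl3, he⟩; exact hMcf hl3 he)]
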